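-- pv_equiv track=rewrite | github.com/ehsanshahkakarh/primer_project | branch_gap_analysis/src/reformat_taxonomy.py | collect_all_ranks
-- ===== SOURCE A (Python) =====
-- def collect_all_ranks(name_to_lineage: dict[str, dict[str, str]]) -> list[str]:
--     """Collect all unique ranks found across all lineages, in a sensible order."""
--     # Preferred rank order
--     rank_order = [
--         "domain", "kingdom", "subkingdom", "superphylum", "phylum", "subphylum",
--         "infraphylum", "superclass", "class", "subclass", "infraclass",
--         "superorder", "order", "suborder", "infraorder", "parvorder",
--         "superfamily", "family", "subfamily", "tribe", "subtribe",
--         "genus", "subgenus", "species_group", "species_subgroup", "species",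
--         "subspecies", "strain", "clade", "no rank"
--     ]
--
--     # Collect all ranks found
--     all_ranks = set()
--     for rank_dict in name_to_lineage.values():
--         all_ranks.update(rank_dict.keys())
--
--     # Sort by preferred order, then alphabetically for unknown ranks
--     def rank_sort_key(r):
--         if r in rank_order:
--             return (0, rank_order.index(r))
--         return (1, r)
--
--     return sorted(all_ranks, key=rank_sort_key)
-- ===== SOURCE B (Python) =====
-- def collect_all_ranks(name_to_lineage: dict[str, dict[str, str]]) -> list[str]:
--     """Collect all unique ranks found across all lineages, in a sensible order."""
--     rank_order = [
--         "domain", "kingdom", "subkingdom", "superphylum", "phylum", "subphylum",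
--         "infraphylum", "superclass", "class", "subclass", "infraclass",
--         "superorder", "order", "suborder", "infraorder", "parvorder",
--         "superfamily", "family", "subfamily", "tribe", "subtribe",
--         "genus", "subgenus", "species_group", "species_subgroup", "species",
--         "subspecies", "strain", "clade", "no rank"
--     ]
--
--     seen = set()
--     for rank_dict in name_to_lineage.values():
--         seen.update(rank_dict.keys())
--
--     # Known ranks in preferred order, then the leftovers alphabetically.
--     known = [r for r in rank_order if r in seen]
--     unknown = sorted(seen - set(rank_order))
--     return known + unknown
-- ===== Notes on version B (the rewrite author's own statement) =====
-- stated objective: simpler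
-- what changed: Instead of sorting the whole rank set with a (known?, index)/(known?, name) tuple key and per-element rank_order.index lookups, B walks the fixed rank_order list once picking the present ranks, sorts only the leftover unknown ranks alphabetically, and concatenates.
import Mathlib
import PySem

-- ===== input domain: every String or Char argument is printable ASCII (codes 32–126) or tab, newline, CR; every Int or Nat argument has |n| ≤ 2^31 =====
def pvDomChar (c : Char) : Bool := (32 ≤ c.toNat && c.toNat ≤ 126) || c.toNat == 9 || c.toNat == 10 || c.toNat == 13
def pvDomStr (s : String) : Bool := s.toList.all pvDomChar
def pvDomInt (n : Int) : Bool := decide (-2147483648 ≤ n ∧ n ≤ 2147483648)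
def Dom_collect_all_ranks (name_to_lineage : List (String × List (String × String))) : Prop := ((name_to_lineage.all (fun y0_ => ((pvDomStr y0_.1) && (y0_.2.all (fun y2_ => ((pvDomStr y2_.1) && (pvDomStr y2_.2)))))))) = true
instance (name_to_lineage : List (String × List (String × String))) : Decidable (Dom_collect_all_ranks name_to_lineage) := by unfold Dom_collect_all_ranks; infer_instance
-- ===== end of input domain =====

-- B replaces A's sort of the whole rank set under a tuple key (with rank_order.index lookups)
-- by one pass over the fixed rank_order list plus an alphabetical sort of the leftover unknown
-- ranks; objective: simpler. Equivalence proved on the return value for all inputs.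

-- the preferred rank order (the same literal list in both Python sources)
def pvRankOrder : List String := [
  "domain", "kingdom", "subkingdom", "superphylum", "phylum", "subphylum",
  "infraphylum", "superclass", "class", "subclass", "infraclass",
  "superorder", "order", "suborder", "infraorder", "parvorder",
  "superfamily", "family", "subfamily", "tribe", "subtribe",
  "genus", "subgenus", "species_group", "species_subgroup", "species",
  "subspecies", "strain", "clade", "no rank"]

-- ===== PORT A =====
-- Python's heterogeneous sort key (0, rank_order.index(r)) for known r / (1, r) for unknown r:
-- every known rank sorts before every unknown one, known ranks by index, unknown ones by string.
-- Encoded order-exactly into Lex (Int × String): (index r, "") for known ranks (index < 30) and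
-- (30, r) = (len(rank_order), r) for unknown ones — the same comparisons on every pair.
def pvRankSortKey (r : String) : Lex (Int × String) :=
  if pvRankOrder.contains r then
    toLex (((PySem.List.index? pvRankOrder r).getD 0 : Int), "")
  else
    toLex ((pvRankOrder.length : Int), r)

def collect_all_ranks (name_to_lineage : List (String × List (String × String))) : List String :=
  -- all_ranks.update(rank_dict.keys()) over name_to_lineage.values()
  let all_ranks : PySem.Set String :=
    name_to_lineage.foldl (fun s p => PySem.Set.update s (p.2.map Prod.fst)) PySem.Set.empty
  PySem.List.sorted all_ranks pvRankSortKey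

-- ===== PORT B =====
def collect_all_ranks_alt (name_to_lineage : List (String × List (String × String))) : List String :=
  let seen : PySem.Set String :=
    name_to_lineage.foldl (fun s p => PySem.Set.update s (p.2.map Prod.fst)) PySem.Set.empty
  let known := pvRankOrder.filter (fun r => PySem.Set.contains seen r)
  let unknown := PySem.List.sorted (PySem.Set.diff seen (PySem.Set.ofList pvRankOrder)) (fun x => x)
  known ++ unknown

-- ===== PRECONDITION & SPEC =====
def Spec_collect_all_ranks (name_to_lineage : List (String × List (String × String))) (out : List String) : Prop := out = collect_all_ranks_alt name_to_lineage
instance (name_to_lineage : List (String × List (String × String))) (out : List String) : Decidable (Spec_collect_all_ranks name_to_lineage out) := by unfold Spec_collect_all_ranks; infer_instance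

-- ===== CLAIM (what is proved, stated in full; the proofs are below) =====
def Claim_equal_collect_all_ranks : Prop := ∀ (name_to_lineage : List (String × List (String × String))), Dom_collect_all_ranks name_to_lineage → Spec_collect_all_ranks name_to_lineage (collect_all_ranks name_to_lineage)

-- ===== LEMMAS AND PROOFS =====

theorem pvRankOrder_nodup : pvRankOrder.Nodup := by decide

set_option maxHeartbeats 1000000 in
theorem pvRankOrder_pairwise_key :
    pvRankOrder.Pairwise (fun a b => pvRankSortKey a < pvRankSortKey b) := by decide

-- the key of a known rank
theorem key_of_mem {r : String} (h : r ∈ pvRankOrder) :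
    ∃ k : Nat, k < pvRankOrder.length ∧
      pvRankSortKey r = toLex ((k : Int), "") := by
  have hc : pvRankOrder.contains r = true := by simpa using h
  rcases Option.ne_none_iff_exists'.mp
      (fun hn => (PySem.List.index?_eq_none_iff pvRankOrder r).mp hn h) with ⟨k, hk⟩
  obtain ⟨hlt, -, -⟩ := PySem.List.getElem_of_index?_eq_some hk
  have hk' : List.idxOf? r pvRankOrder = some k := by
    simpa [PySem.List.index?_eq_idxOf?] using hk
  exact ⟨k, hlt, by simp [pvRankSortKey, h, hk']⟩

-- the key of an unknown rank
theorem key_of_not_mem {r : String} (h : r ∉ pvRankOrder) :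
    pvRankSortKey r = toLex ((pvRankOrder.length : Int), r) := by
  simp [pvRankSortKey, h]

-- the seen-set is duplicate-free
theorem pvSeen_nodup (nt : List (String × List (String × String))) (s : PySem.Set String)
    (hs : s.Nodup) :
    (nt.foldl (fun s p => PySem.Set.update s (p.2.map Prod.fst)) s).Nodup := by
  induction nt generalizing s with
  | nil => exact hs
  | cons p t ih => exact ih _ (PySem.Set.nodup_update _ _ hs)

-- the core fact: A's single keyed sort of a duplicate-free set equals B's
-- "known ranks in preferred order ++ alphabetically sorted unknown ranks"
theorem sorted_key_split (S : List String) (hS : S.Nodup) :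
    PySem.List.sorted S pvRankSortKey =
      pvRankOrder.filter (fun r => PySem.Set.contains S r) ++
        PySem.List.sorted (PySem.Set.diff S (PySem.Set.ofList pvRankOrder)) (fun x => x) := by
  have hdiffmem : ∀ x : String,
      x ∈ PySem.Set.diff S (PySem.Set.ofList pvRankOrder) ↔ x ∈ S ∧ x ∉ pvRankOrder := by
    intro x
    simp [PySem.Set.diff, PySem.Set.contains, PySem.Set.mem_ofList]
  have hdiffnodup : (PySem.Set.diff S (PySem.Set.ofList pvRankOrder)).Nodup :=
    hS.filter _
  have hsortnodup :
      (PySem.List.sorted (PySem.Set.diff S (PySem.Set.ofList pvRankOrder)) (fun x => x)).Nodup :=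
    (PySem.List.sorted_perm _ _ _).symm.nodup hdiffnodup
  have hsortmem : ∀ x : String,
      x ∈ PySem.List.sorted (PySem.Set.diff S (PySem.Set.ofList pvRankOrder)) (fun x => x) ↔
        x ∈ S ∧ x ∉ pvRankOrder := by
    intro x
    rw [PySem.List.mem_sorted]
    exact hdiffmem x
  apply PySem.List.sorted_eq_of_perm_of_pairwise_lt
  · -- permutation
    have h1 : (pvRankOrder.filter (fun r => PySem.Set.contains S r)).Perm
        (S.filter (fun r => pvRankOrder.contains r)) := by
      rw [List.perm_ext_iff_of_nodup (pvRankOrder_nodup.filter _) (hS.filter _)]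
      intro a
      simp [PySem.Set.contains, and_comm]
    have h2 : (PySem.List.sorted (PySem.Set.diff S (PySem.Set.ofList pvRankOrder))
        (fun x => x)).Perm (S.filter (fun r => !pvRankOrder.contains r)) := by
      rw [List.perm_ext_iff_of_nodup hsortnodup (hS.filter _)]
      intro a
      rw [hsortmem a]
      simp
    exact (h1.append h2).trans (List.filter_append_perm _ S)
  · -- strictly increasing keys
    rw [List.pairwise_append]
    refine ⟨pvRankOrder_pairwise_key.filter _, ?_, ?_⟩
    · -- tail: alphabetically sorted unknown ranks
      have hle := PySem.List.sorted_pairwise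
        (PySem.Set.diff S (PySem.Set.ofList pvRankOrder)) (fun x : String => x)
      have hlt := (hle.and hsortnodup).imp
        (fun {a b} h => lt_of_le_of_ne h.1 h.2)
      refine hlt.imp_of_mem ?_
      intro a b ha hb hab
      rw [key_of_not_mem ((hsortmem a).mp ha).2, key_of_not_mem ((hsortmem b).mp hb).2,
        Prod.Lex.toLex_lt_toLex]
      exact Or.inr ⟨rfl, hab⟩
    · -- every known rank precedes every unknown one
      intro a ha b hb
      have haro : a ∈ pvRankOrder := List.mem_of_mem_filter ha
      obtain ⟨k, hk, hkey⟩ := key_of_mem haro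
      rw [hkey, key_of_not_mem ((hsortmem b).mp hb).2, Prod.Lex.toLex_lt_toLex]
      left
      dsimp only
      exact_mod_cast hk

-- ===== VERDICT (by name: the statement is the Claim_ definition above) =====
theorem collect_all_ranks_spec : Claim_equal_collect_all_ranks := by
  intro nt _
  show collect_all_ranks nt = collect_all_ranks_alt nt
  unfold collect_all_ranks collect_all_ranks_alt
  exact sorted_key_split _ (pvSeen_nodup nt PySem.Set.empty List.nodup_nil)
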